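-- pv_equiv track=rewrite | github.com/DONGPYEONG/daolrepair-landing | scripts/make_reel.py | parse_slug_meta
-- ===== SOURCE A (Python) =====
-- def parse_slug_meta(slug: str) -> dict:
--     parts = slug.split("-")
--     if len(parts) < 6:
--         return {"date": "", "device": "", "model": "", "repair": ""}
--     d = f"{parts[1]}-{parts[2]}-{parts[3]}"
--     device = parts[4] if len(parts) > 4 else ""
--     repair_map = {
--         "battery": "배터리 교체", "screen": "액정 교체", "back": "후면 유리 교체",
--         "charge": "충전단자 수리", "charging": "충전단자 수리",
--         "camera": "카메라 수리", "water": "침수 처리",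
--         "speaker": "스피커 수리", "mic": "마이크 수리", "microphone": "마이크 수리",
--         "board": "메인보드 수리", "homebutton": "홈버튼 수리",
--     }
--     for i in range(len(parts) - 1, 4, -1):
--         token = parts[i].lower()
--         if "+" in token:
--             subs = [repair_map[t] for t in token.split("+") if t in repair_map]
--             if subs:
--                 return {"date": d, "device": device,
--                         "model": "-".join(parts[5:i]),
--                         "repair": " + ".join(subs)}
--         if token in repair_map:
--             return {"date": d, "device": device,
--                     "model": "-".join(parts[5:i]),
--                     "repair": repair_map[token]}
--     return {"date": d, "device": device, "model": parts[5] if len(parts) > 5 else "", "repair": ""}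
-- ===== SOURCE B (Python) =====
-- REPAIR_MAP = {
--     "battery": "배터리 교체", "screen": "액정 교체", "back": "후면 유리 교체",
--     "charge": "충전단자 수리", "charging": "충전단자 수리",
--     "camera": "카메라 수리", "water": "침수 처리",
--     "speaker": "스피커 수리", "mic": "마이크 수리", "microphone": "마이크 수리",
--     "board": "메인보드 수리", "homebutton": "홈버튼 수리",
-- }
--
--
-- def _resolve(token):
--     """Resolve a lowercased token to a repair label, or None."""
--     if "+" in token:
--         subs = [REPAIR_MAP[t] for t in token.split("+") if t in REPAIR_MAP]
--         return " + ".join(subs) if subs else None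
--     return REPAIR_MAP.get(token)
--
--
-- def parse_slug_meta(slug: str) -> dict:
--     parts = slug.split("-")
--     if len(parts) < 6:
--         return {"date": "", "device": "", "model": "", "repair": ""}
--     tail = parts[5:]
--     # consume the suffix list by popping from its end; what remains is the model
--     model, repair = tail[0], ""
--     probe = tail[:]
--     while probe:
--         r = _resolve(probe.pop().lower())
--         if r is not None:
--             model, repair = "-".join(probe), r
--             break
--     return {"date": "-".join(parts[1:4]), "device": parts[4],
--             "model": model, "repair": repair}
-- ===== Notes on version B (the rewrite author's own statement) =====
-- stated objective: alternative
-- what changed: Works on the suffix list itself instead of an index range: copies parts[5:], repeatedly pops its last element until one resolves in the repair table, and builds the model from the list that remains (no indices, no slicing in the loop), assembling the dict once at the end.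
import Mathlib
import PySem

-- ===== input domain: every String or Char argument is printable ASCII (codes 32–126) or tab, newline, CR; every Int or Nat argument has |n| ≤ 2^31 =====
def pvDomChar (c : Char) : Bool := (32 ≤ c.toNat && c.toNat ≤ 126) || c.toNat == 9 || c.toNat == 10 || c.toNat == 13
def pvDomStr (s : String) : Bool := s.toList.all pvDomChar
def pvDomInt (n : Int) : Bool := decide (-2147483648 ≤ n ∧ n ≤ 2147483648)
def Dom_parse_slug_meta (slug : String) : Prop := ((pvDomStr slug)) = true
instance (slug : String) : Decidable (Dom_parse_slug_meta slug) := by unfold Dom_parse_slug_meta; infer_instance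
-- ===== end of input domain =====

-- B replaces A's reverse index loop (with slicing and early returns) by consuming a copy
-- of the suffix list parts[5:] that is popped from its end until a token resolves, the
-- remaining list being the model (objective: alternative; return values are identical).

-- the repair_map literal, identical in both Pythons
def pvRepairMap : PySem.Dict String String :=
  PySem.Dict.ofList
    [("battery", "배터리 교체"), ("screen", "액정 교체"), ("back", "후면 유리 교체"),
     ("charge", "충전단자 수리"), ("charging", "충전단자 수리"),
     ("camera", "카메라 수리"), ("water", "침수 처리"),
     ("speaker", "스피커 수리"), ("mic", "마이크 수리"), ("microphone", "마이크 수리"),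
     ("board", "메인보드 수리"), ("homebutton", "홈버튼 수리")]

-- ===== PORT A =====
-- A's for-loop over range(len(parts)-1, 4, -1) with early returns, as recursion on the index list
def pvLoopA (parts : List String) (d device : String) : List Int → List (String × String)
  | [] => [("date", d), ("device", device),
           ("model", if 5 < parts.length then PySem.List.pyGetD parts 5 "" else ""),
           ("repair", "")]
  | i :: rest =>
      let token := PySem.Str.lower (PySem.List.pyGetD parts i "")
      let plusRes : Option (List (String × String)) :=
        if PySem.Str.isIn "+" token then
          let subs := (((PySem.Str.split? token "+").getD []).filter
              (fun t => pvRepairMap.contains t)).map (fun t => pvRepairMap.getD t "")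
          if subs ≠ [] then
            some [("date", d), ("device", device),
                  ("model", PySem.Str.join "-" (PySem.List.slice parts (some 5) (some i))),
                  ("repair", PySem.Str.join " + " subs)]
          else none
        else none
      match plusRes with
      | some r => r
      | none =>
        if pvRepairMap.contains token then
          [("date", d), ("device", device),
           ("model", PySem.Str.join "-" (PySem.List.slice parts (some 5) (some i))),
           ("repair", pvRepairMap.getD token "")]
        else pvLoopA parts d device rest

def parse_slug_meta (slug : String) : List (String × String) :=
  let parts := (PySem.Str.split? slug "-").getD []
  if parts.length < 6 then [("date", ""), ("device", ""), ("model", ""), ("repair", "")]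
  else
    let d := PySem.Str.join "-"
      [PySem.List.pyGetD parts 1 "", PySem.List.pyGetD parts 2 "", PySem.List.pyGetD parts 3 ""]
    let device := if 4 < parts.length then PySem.List.pyGetD parts 4 "" else ""
    pvLoopA parts d device (PySem.List.pyRange ((parts.length : Int) - 1) 4 (-1))

-- ===== PORT B =====
-- Source B's _resolve helper
def pvResolve (token : String) : Option String :=
  if PySem.Str.isIn "+" token then
    let subs := (((PySem.Str.split? token "+").getD []).filter
        (fun t => pvRepairMap.contains t)).map (fun t => pvRepairMap.getD t "")
    if subs = [] then none else some (PySem.Str.join " + " subs)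
  else pvRepairMap.get? token

-- Source B's 'while probe: r = _resolve(probe.pop().lower()); …' loop: probe.pop() removes the
-- LAST element, ported exactly as structural recursion on the REVERSED probe list (the head
-- of the reverse is the popped element, the tail of the reverse is the remaining probe).
def pvFindRev : List String → Option (List String × String)
  | [] => none
  | t :: rest =>
      match pvResolve (PySem.Str.lower t) with
      | some r => some (rest, r)
      | none => pvFindRev rest

def parse_slug_meta_alt (slug : String) : List (String × String) :=
  let parts := (PySem.Str.split? slug "-").getD []
  if parts.length < 6 then [("date", ""), ("device", ""), ("model", ""), ("repair", "")]
  else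
    let tail := PySem.List.slice parts (some 5) none
    let mr : String × String :=
      match pvFindRev tail.reverse with
      | some (rest, r) => (PySem.Str.join "-" rest.reverse, r)
      | none => (PySem.List.pyGetD tail 0 "", "")
    [("date", PySem.Str.join "-" (PySem.List.slice parts (some 1) (some 4))),
     ("device", PySem.List.pyGetD parts 4 ""),
     ("model", mr.1), ("repair", mr.2)]

-- ===== PRECONDITION & SPEC =====
def Spec_parse_slug_meta (slug : String) (out : List (String × String)) : Prop := out = parse_slug_meta_alt slug
instance (slug : String) (out : List (String × String)) : Decidable (Spec_parse_slug_meta slug out) := by unfold Spec_parse_slug_meta; infer_instance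

-- ===== CLAIM (what is proved, stated in full; the proofs are below) =====
def Claim_equal_parse_slug_meta : Prop := ∀ (slug : String), Dom_parse_slug_meta slug → Spec_parse_slug_meta slug (parse_slug_meta slug)

-- ===== LEMMAS AND PROOFS =====

-- no key of the repair map contains '+'
lemma pvNoPlus (t : String) (h : pvRepairMap.contains t = true) :
    PySem.Str.isIn "+" t = false := by
  have hk : t ∈ pvRepairMap.keys := (PySem.Dict.contains_iff_mem_keys _ _).1 h
  have hkeys : pvRepairMap.keys = ["battery", "screen", "back", "charge", "charging", "camera",
      "water", "speaker", "mic", "microphone", "board", "homebutton"] := by decide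
  rw [hkeys] at hk
  fin_cases hk <;> decide

-- one iteration of A's loop, expressed through B's resolver
lemma pvBodyA (parts : List String) (d device : String) (i : Int) (rest : List Int) :
    pvLoopA parts d device (i :: rest) =
      match pvResolve (PySem.Str.lower (PySem.List.pyGetD parts i "")) with
      | some r =>
          [("date", d), ("device", device),
           ("model", PySem.Str.join "-" (PySem.List.slice parts (some 5) (some i))),
           ("repair", r)]
      | none => pvLoopA parts d device rest := by
  simp only [pvLoopA, pvResolve]
  set token := PySem.Str.lower (PySem.List.pyGetD parts i "") with htok
  cases hplus : PySem.Str.isIn "+" token with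
  | true =>
      set subs := (((PySem.Str.split? token "+").getD []).filter
          (fun t => pvRepairMap.contains t)).map (fun t => pvRepairMap.getD t "") with hsubs
      by_cases hnil : subs = []
      · -- subs empty: A falls through to the membership test, which must fail ('+' in token)
        have hc : pvRepairMap.contains token = false := by
          cases hcv : pvRepairMap.contains token
          · rfl
          · rw [pvNoPlus token hcv] at hplus; exact absurd hplus (by simp)
        simp [hnil, hc]
      · simp [hnil]
  | false =>
      cases hv : pvRepairMap.get? token with
      | some v =>
          have hc : pvRepairMap.contains token = true := by
            cases hcv : pvRepairMap.contains token
            · rw [← PySem.Dict.get?_eq_none_iff_contains] at hcv; rw [hcv] at hv; exact absurd hv (by simp)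
            · rfl
          simp [hc, hv, PySem.Dict.getD]
      | none =>
          have hc := (PySem.Dict.get?_eq_none_iff_contains _ _).1 hv
          simp [hc]

-- A's loop over the remaining indices [k-1, …, 5] equals B's pop-recursion over the
-- reversed prefix parts[5:k]
lemma pvMain (parts : List String) (d device : String) (h : 6 ≤ parts.length) :
    ∀ k : ℕ, 5 ≤ k → k ≤ parts.length →
    pvLoopA parts d device (PySem.List.pyRange ((k : Int) - 1) 4 (-1)) =
      (match pvFindRev (((parts.take k).drop 5).reverse) with
       | some (rest, r) =>
           [("date", d), ("device", device),
            ("model", PySem.Str.join "-" rest.reverse), ("repair", r)]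
       | none =>
           [("date", d), ("device", device),
            ("model", PySem.List.pyGetD parts 5 ""), ("repair", "")]) := by
  intro k hk5
  induction k, hk5 using Nat.le_induction with
  | base =>
      intro _
      have h1 : ((5 : ℕ) : Int) - 1 = 4 := by norm_num
      have h2 : (parts.take 5).drop 5 = [] :=
        List.drop_eq_nil_of_le (le_trans (List.length_take_le _ _) (le_refl 5))
      rw [h1, PySem.List.pyRange_neg_one_eq_nil (le_refl 4), h2]
      simp only [List.reverse_nil, pvFindRev, pvLoopA]
      rw [if_pos (by omega : 5 < parts.length)]
  | succ k hk ih =>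
      intro hk1
      have hklt : k < parts.length := by omega
      have h1 : ((k + 1 : ℕ) : Int) - 1 = (k : Int) := by push_cast; ring
      have h2 : PySem.List.pyRange (k : Int) 4 (-1) =
          (k : Int) :: PySem.List.pyRange ((k : Int) - 1) 4 (-1) :=
        PySem.List.pyRange_neg_one_cons (by exact_mod_cast by omega : (4 : Int) < (k : Int))
      rw [h1, h2, pvBodyA]
      -- the token A reads at index k is the element B pops
      have htok : PySem.List.pyGetD parts ((k : ℕ) : Int) "" = parts[k] := by
        rw [PySem.List.pyGetD_natCast]; exact List.getD_eq_getElem _ _ hklt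
      -- parts[5:k+1] reversed = parts[k] :: (parts[5:k]).reverse
      have htake : parts.take (k + 1) = parts.take k ++ [parts[k]] := by
        rw [List.take_add_one]; simp [List.getElem?_eq_getElem hklt]
      have hdrop : (parts.take (k + 1)).drop 5 = (parts.take k).drop 5 ++ [parts[k]] := by
        rw [htake, List.drop_append_of_le_length (by simp [List.length_take]; omega)]
      have hslice : PySem.List.slice parts (some 5) (some ((k : ℕ) : Int)) =
          (parts.take k).drop 5 := by
        rw [PySem.List.slice_toNat parts (by norm_num : (0:Int) ≤ 5) (Int.natCast_nonneg k),
          List.drop_take]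
        rfl
      rw [hdrop, List.reverse_append, List.reverse_singleton, List.singleton_append]
      simp only [pvFindRev, htok]
      cases hres : pvResolve (PySem.Str.lower parts[k]) with
      | some r => simp [hslice, List.reverse_reverse]
      | none => exact ih (by omega)

-- parts with at least six elements destructure into six heads and a tail
lemma pvParts6 : ∀ (parts : List String), 6 ≤ parts.length →
    ∃ a b c d e f t, parts = a :: b :: c :: d :: e :: f :: t
  | a :: b :: c :: d :: e :: f :: t, _ => ⟨a, b, c, d, e, f, t, rfl⟩
  | [], h => absurd h (by simp)
  | [_], h => absurd h (by simp)
  | [_, _], h => absurd h (by simp)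
  | [_, _, _], h => absurd h (by simp)
  | [_, _, _, _], h => absurd h (by simp)
  | [_, _, _, _, _], h => absurd h (by simp)

-- ===== VERDICT (by name: the statement is the Claim_ definition above) =====
theorem parse_slug_meta_spec : Claim_equal_parse_slug_meta := by
  intro slug _
  unfold Spec_parse_slug_meta parse_slug_meta parse_slug_meta_alt
  set parts := (PySem.Str.split? slug "-").getD [] with hparts
  by_cases hlen : parts.length < 6
  · simp [hlen]
  · have h6 : 6 ≤ parts.length := by omega
    simp only [if_neg hlen]
    have hmain := pvMain parts
      (PySem.Str.join "-" [PySem.List.pyGetD parts 1 "", PySem.List.pyGetD parts 2 "",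
        PySem.List.pyGetD parts 3 ""])
      (if 4 < parts.length then PySem.List.pyGetD parts 4 "" else "") h6
      parts.length (by omega) (le_refl _)
    rw [List.take_length] at hmain
    rw [hmain]
    -- align B's slice-based fields with A's pyGetD-based ones by destructuring parts
    obtain ⟨a, b, c, d, e, f, t, hep⟩ := pvParts6 parts h6
    have htail : PySem.List.slice parts (some 5) none = parts.drop 5 := by
      simpa using PySem.List.slice_from parts (by norm_num : (0:Int) ≤ 5)
    have hdate : PySem.List.slice parts (some 1) (some 4) = [PySem.List.pyGetD parts 1 "",
        PySem.List.pyGetD parts 2 "", PySem.List.pyGetD parts 3 ""] := by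
      rw [PySem.List.slice_toNat parts (by norm_num : (0:Int) ≤ 1) (by norm_num : (0:Int) ≤ 4),
        hep]
      simp [pysem]
    have hdev : (if 4 < parts.length then PySem.List.pyGetD parts 4 "" else "") =
        PySem.List.pyGetD parts 4 "" := if_pos (by omega)
    have hfall : PySem.List.pyGetD (parts.drop 5) 0 "" = PySem.List.pyGetD parts 5 "" := by
      rw [hep]; simp [pysem]
    rw [htail, hdate, hdev]
    cases hres : pvFindRev (parts.drop 5).reverse with
    | some p => rfl
    | none => rw [hfall]
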